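-- pv_equiv track=rewrite | github.com/graphoflife/GraphOfLife | DataAnalyzer.py | get_token_attack_along_edge_distribution
-- ===== SOURCE A (Python) =====
-- def add_to_counter_dict(dict, value, how_much = 1):
--     if value in dict:
--         dict[value] += how_much
--     else:
--         dict[value] = how_much
--
-- def get_token_attack_along_edge_distribution(token_attacks):
--     attack_counter_dict = {}
--     for cur_token_attack in token_attacks:
--         sorted_id_list = sorted([cur_token_attack[0], cur_token_attack[1]])
--         id_string = f"{sorted_id_list[0]}, {sorted_id_list[1]}"
--         add_to_counter_dict(attack_counter_dict, id_string, cur_token_attack[2])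
--
--     counter_dict_to_fill = {}
--     for cur_attack_amount in attack_counter_dict.items():
--         add_to_counter_dict(counter_dict_to_fill, cur_attack_amount[1])
--     counter_dict_to_fill = dict(sorted(counter_dict_to_fill.items()))
--
--     return counter_dict_to_fill
-- ===== SOURCE B (Python) =====
-- def get_token_attack_along_edge_distribution(token_attacks):
--     # sort-then-group aggregation over normalized edge keys instead of a hash dict
--     keyed = [((a, b) if a <= b else (b, a), w) for (a, b, w) in token_attacks]
--     keyed.sort(key=lambda p: (p[0][0], p[0][1]))
--     totals = []
--     cur_key = None
--     cur_sum = 0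
--     for k, w in keyed:
--         if cur_key is None:
--             cur_key, cur_sum = k, w
--         elif k != cur_key:
--             totals.append(cur_sum)
--             cur_key, cur_sum = k, w
--         else:
--             cur_sum += w
--     if cur_key is not None:
--         totals.append(cur_sum)
--     dist = {}
--     for t in totals:
--         dist[t] = dist.get(t, 0) + 1
--     return dict(sorted(dist.items()))
-- ===== Notes on version B (the rewrite author's own statement) =====
-- stated objective: alternative
-- what changed: Replaces the string-keyed hash-dict per-edge aggregation with sorting the normalized (min,max) edge keys and a single linear grouping pass that emits one per-edge total per key run, then tallies those totals.
import Mathlib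
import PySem

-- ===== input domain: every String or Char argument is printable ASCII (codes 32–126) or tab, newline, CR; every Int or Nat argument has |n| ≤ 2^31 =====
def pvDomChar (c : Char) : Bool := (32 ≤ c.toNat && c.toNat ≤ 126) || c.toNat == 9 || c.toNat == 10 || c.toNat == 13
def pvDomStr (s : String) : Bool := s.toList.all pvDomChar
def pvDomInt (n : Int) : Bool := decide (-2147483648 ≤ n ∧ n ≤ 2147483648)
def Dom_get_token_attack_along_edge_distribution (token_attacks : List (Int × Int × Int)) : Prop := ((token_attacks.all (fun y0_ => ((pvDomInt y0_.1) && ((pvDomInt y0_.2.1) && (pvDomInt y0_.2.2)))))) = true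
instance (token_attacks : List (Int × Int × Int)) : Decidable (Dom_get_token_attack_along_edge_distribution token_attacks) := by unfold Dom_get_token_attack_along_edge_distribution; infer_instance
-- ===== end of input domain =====

-- B replaces A's string-keyed hash-dict per-edge aggregation by sort-then-group over
-- normalized (min,max) pair keys; same return value (alternative decomposition, not claimed faster).

-- ===== PORT A =====
def add_to_counter_dict {κ : Type} [BEq κ] (d : PySem.Dict κ Int) (value : κ) (how_much : Int) : PySem.Dict κ Int :=
  if d.contains value then d.modify value 0 (· + how_much) else d.insert value how_much

def get_token_attack_along_edge_distribution (token_attacks : List (Int × Int × Int)) : List (Int × Int) :=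
  let attack_counter_dict := token_attacks.foldl (fun d cur_token_attack =>
    let sorted_id_list := PySem.List.sorted [cur_token_attack.1, cur_token_attack.2.1] (fun x => x) false
    let id_string := PySem.Int.toStr (PySem.List.pyGetD sorted_id_list 0 0) ++ ", " ++
                     PySem.Int.toStr (PySem.List.pyGetD sorted_id_list 1 0)
    add_to_counter_dict d id_string cur_token_attack.2.2) PySem.Dict.empty
  let counter_dict_to_fill := attack_counter_dict.items.foldl
    (fun d cur_attack_amount => add_to_counter_dict d cur_attack_amount.2 1) PySem.Dict.empty
  (PySem.Dict.ofList (PySem.List.sorted2 counter_dict_to_fill.items (fun p => p.1) (fun p => p.2) false)).items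

-- ===== PORT B =====
-- B's grouping-loop body and final flush (the Python for-loop state is (cur_key, cur_sum, totals))
def bStep (st : Option (Int × Int) × Int × List Int) (p : (Int × Int) × Int) :
    Option (Int × Int) × Int × List Int :=
  match st.1 with
  | none => (some p.1, p.2, st.2.2)
  | some k => if p.1 ≠ k then (some p.1, p.2, st.2.2 ++ [st.2.1])
              else (some k, st.2.1 + p.2, st.2.2)

def bFinish (st : Option (Int × Int) × Int × List Int) : List Int :=
  match st.1 with
  | none => st.2.2
  | some _ => st.2.2 ++ [st.2.1]

def get_token_attack_along_edge_distribution_alt (token_attacks : List (Int × Int × Int)) : List (Int × Int) :=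
  let keyed := token_attacks.map (fun t =>
    (if t.1 ≤ t.2.1 then (t.1, t.2.1) else (t.2.1, t.1), t.2.2))
  let skeyed := PySem.List.sorted2 keyed (fun p => p.1.1) (fun p => p.1.2) false
  let totals := bFinish (skeyed.foldl bStep (none, 0, []))
  let dist := totals.foldl (fun d t => d.insert t (d.getD t 0 + 1)) PySem.Dict.empty
  (PySem.Dict.ofList (PySem.List.sorted2 dist.items (fun p => p.1) (fun p => p.2) false)).items

-- ===== PRECONDITION & SPEC =====
def Spec_get_token_attack_along_edge_distribution (token_attacks : List (Int × Int × Int)) (out : List (Int × Int)) : Prop := out = get_token_attack_along_edge_distribution_alt token_attacks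
instance (token_attacks : List (Int × Int × Int)) (out : List (Int × Int)) : Decidable (Spec_get_token_attack_along_edge_distribution token_attacks out) := by unfold Spec_get_token_attack_along_edge_distribution; infer_instance

-- ===== CLAIM (what is proved, stated in full; the proofs are below) =====
def Claim_equal_get_token_attack_along_edge_distribution : Prop := ∀ (token_attacks : List (Int × Int × Int)), Dom_get_token_attack_along_edge_distribution token_attacks → Spec_get_token_attack_along_edge_distribution token_attacks (get_token_attack_along_edge_distribution token_attacks)

-- ===== LEMMAS AND PROOFS =====

-- proof-side abbreviations
def pvKeyB (t : Int × Int × Int) : Int × Int :=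
  if t.1 ≤ t.2.1 then (t.1, t.2.1) else (t.2.1, t.1)

def pvStrKey (p : Int × Int) : String := PySem.Int.toStr p.1 ++ ", " ++ PySem.Int.toStr p.2

def pvSumW {κ : Type} [BEq κ] (l : List (κ × Int)) (c : κ) : Int :=
  ((l.filter (fun p => p.1 == c)).map (fun p => p.2)).sum

def pvAgg {κ : Type} [BEq κ] (l : List (κ × Int)) : List Int :=
  (PySem.Set.ofList (l.map Prod.fst)).map (pvSumW l)

def pvDist (ts : List Int) : List (Int × Int) :=
  (PySem.Set.ofList ts).map (fun t => (t, (ts.count t : Int)))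

def pvDD {κ : Type} [DecidableEq κ] : List κ → List κ
  | [] => []
  | x :: xs => x :: (pvDD xs).filter (fun y => y ≠ x)

def pvGrp : (Int × Int) → Int → List ((Int × Int) × Int) → List Int
  | _, s, [] => [s]
  | k, s, p :: r => if p.1 ≠ k then s :: pvGrp p.1 p.2 r else pvGrp k (s + p.2) r

def pvLexLe (a b : Int × Int) : Prop := a.1 < b.1 ∨ (a.1 = b.1 ∧ a.2 ≤ b.2)

def pvBefE (a b : (Int × Int) × Int) : Bool :=
  decide (a.1.1 < b.1.1) || (!decide (b.1.1 < a.1.1) && decide (a.1.2 < b.1.2))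

def pvBefP (a b : Int × Int) : Bool :=
  decide (a.1 < b.1) || (!decide (b.1 < a.1) && decide (a.2 < b.2))

-- ---------- decimal-string injectivity ----------
def pvDecode (l : List Char) : Nat := l.foldl (fun a c => 10 * a + (c.toNat - 48)) 0

theorem pv_digitChar_val (d : Nat) (h : d < 10) : (Nat.digitChar d).toNat - 48 = d := by
  interval_cases d <;> rfl

theorem pv_decode_append (xs : List Char) (c : Char) :
    pvDecode (xs ++ [c]) = 10 * pvDecode xs + (c.toNat - 48) := by
  simp [pvDecode, List.foldl_append]

theorem pv_decode_toDigits : ∀ n : Nat, pvDecode (Nat.toDigits 10 n) = n := by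
  intro n
  induction n using Nat.strong_induction_on with
  | _ n ih =>
    rw [Nat.toDigits_eq_if (by norm_num)]
    by_cases h : n < 10
    · simp [h, pvDecode, pv_digitChar_val n h]
    · simp only [h, if_false]
      rw [pv_decode_append, ih (n / 10) (by omega), pv_digitChar_val _ (by omega)]
      omega

theorem pv_toDigits_inj {m n : Nat} (h : Nat.toDigits 10 m = Nat.toDigits 10 n) : m = n := by
  have := pv_decode_toDigits m
  rw [h, pv_decode_toDigits] at this
  omega

theorem pv_toDigits_no_dash {n : Nat} {c : Char} (h : c ∈ Nat.toDigits 10 n) : c ≠ '-' ∧ c ≠ ',' := by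
  have hd := Nat.isDigit_of_mem_toDigits (by norm_num) (by norm_num) h
  constructor <;> rintro rfl <;> simp [Char.isDigit] at hd

theorem pv_toChars_inj : Function.Injective PySem.Int.toChars := by
  intro m n h
  unfold PySem.Int.toChars at h
  split_ifs at h with h1 h2 h2
  · simp only [List.cons.injEq, true_and] at h
    have := pv_toDigits_inj h
    omega
  · exfalso
    have : '-' ∈ Nat.toDigits 10 n.toNat := by rw [← h]; exact List.mem_cons_self
    exact (pv_toDigits_no_dash this).1 rfl
  · exfalso
    have : '-' ∈ Nat.toDigits 10 m.toNat := by rw [h]; exact List.mem_cons_self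
    exact (pv_toDigits_no_dash this).1 rfl
  · have := pv_toDigits_inj h; omega

theorem pv_toChars_no_comma {n : Int} {c : Char} (h : c ∈ PySem.Int.toChars n) : c ≠ ',' := by
  unfold PySem.Int.toChars at h
  split_ifs at h
  · rcases List.mem_cons.mp h with rfl | h
    · decide
    · exact (pv_toDigits_no_dash h).2
  · exact (pv_toDigits_no_dash h).2

theorem pv_split_comma : ∀ (s₁ : List Char) (s₂ t₁ t₂ : List Char),
    (∀ c ∈ s₁, c ≠ ',') → (∀ c ∈ s₂, c ≠ ',') →
    s₁ ++ ',' :: ' ' :: t₁ = s₂ ++ ',' :: ' ' :: t₂ → s₁ = s₂ ∧ t₁ = t₂ := by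
  intro s₁
  induction s₁ with
  | nil =>
    intro s₂ t₁ t₂ _ h₂ h
    cases s₂ with
    | nil => simpa using h
    | cons b bs =>
      exfalso
      simp only [List.nil_append, List.cons_append, List.cons.injEq] at h
      exact h₂ b (List.mem_cons_self) h.1.symm
  | cons a as ih =>
    intro s₂ t₁ t₂ h₁ h₂ h
    cases s₂ with
    | nil =>
      exfalso
      simp only [List.nil_append, List.cons_append, List.cons.injEq] at h
      exact h₁ a (List.mem_cons_self) h.1
    | cons b bs =>
      simp only [List.cons_append, List.cons.injEq] at h
      obtain ⟨rfl, h⟩ := h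
      obtain ⟨rfl, rfl⟩ := ih bs t₁ t₂ (fun c hc => h₁ c (List.mem_cons_of_mem _ hc))
        (fun c hc => h₂ c (List.mem_cons_of_mem _ hc)) h
      exact ⟨rfl, rfl⟩

theorem pv_strKey_inj : Function.Injective pvStrKey := by
  intro p q h
  have h' : (pvStrKey p).toList = (pvStrKey q).toList := by rw [h]
  unfold pvStrKey at h'
  simp only [String.toList_append, PySem.Int.toList_toStr] at h'
  have hsep : (", " : String).toList = [',', ' '] := by decide
  rw [hsep] at h'
  simp only [List.append_assoc, List.cons_append, List.nil_append] at h'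
  obtain ⟨e1, e2⟩ := pv_split_comma _ _ _ _ (fun c hc => pv_toChars_no_comma hc)
    (fun c hc => pv_toChars_no_comma hc) h'
  exact Prod.ext (pv_toChars_inj e1) (pv_toChars_inj e2)

-- ---------- weighted-sum bookkeeping ----------
theorem pv_sumW_nil {κ : Type} [BEq κ] (c : κ) : pvSumW [] c = 0 := rfl

theorem pv_sumW_cons {κ : Type} [BEq κ] (k : κ) (v : Int) (r : List (κ × Int)) (c : κ) :
    pvSumW ((k, v) :: r) c = (if k == c then v else 0) + pvSumW r c := by
  simp only [pvSumW, List.filter_cons]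
  split <;> simp

theorem pv_sumW_perm {κ : Type} [BEq κ] {l l' : List (κ × Int)} (h : l.Perm l') (c : κ) :
    pvSumW l c = pvSumW l' c :=
  List.Perm.sum_eq (List.Perm.map _ (List.Perm.filter _ h))

theorem pv_sumW_ones {α κ : Type} [BEq κ] [LawfulBEq κ] (l : List α) (g : α → κ) (c : κ) :
    pvSumW (l.map (fun x => (g x, (1 : Int)))) c = ((l.map g).count c : Int) := by
  induction l with
  | nil => rfl
  | cons x xs ih =>
    simp only [List.map_cons, pv_sumW_cons, ih, List.count_cons]
    by_cases h : g x = c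
    · simp [h]
      omega
    · simp [h]

theorem pv_getD_foldl_addW {β κ : Type} [BEq κ] [LawfulBEq κ] [DecidableEq κ]
    (key : β → κ) (w : β → Int) :
    ∀ (l : List β) (d : PySem.Dict κ Int) (c : κ),
    (l.foldl (fun d t => d.insert (key t) (d.getD (key t) 0 + w t)) d).getD c 0
      = d.getD c 0 + pvSumW (l.map (fun t => (key t, w t))) c := by
  intro l
  induction l with
  | nil => simp [pv_sumW_nil]
  | cons t r ih =>
    intro d c
    simp only [List.foldl_cons, List.map_cons, pv_sumW_cons, ih]
    rw [PySem.Dict.getD_insert]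
    by_cases h : c = key t
    · subst h; simp
      ring
    · have : (key t == c) = false := by simp; exact fun h' => absurd h'.symm h
      simp [h, this]

theorem pv_items_ofList {κ ν : Type} [BEq κ] [LawfulBEq κ] (l : List (κ × ν))
    (h : (l.map Prod.fst).Nodup) : (PySem.Dict.ofList l).items = l := by
  have := PySem.Dict.items_foldl_insert_fresh l Prod.fst Prod.snd PySem.Dict.empty
    (fun a _ => PySem.Dict.contains_empty _) h
  simpa [PySem.Dict.ofList, PySem.Dict.update] using this

-- ---------- first-occurrence dedup ----------
theorem pv_mem_pvDD {κ : Type} [DecidableEq κ] (xs : List κ) (y : κ) : y ∈ pvDD xs ↔ y ∈ xs := by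
  induction xs with
  | nil => simp [pvDD]
  | cons x xs ih =>
    simp only [pvDD, List.mem_cons, List.mem_filter, ih]
    by_cases h : y = x <;> simp [h]

theorem pv_nodup_pvDD {κ : Type} [DecidableEq κ] (xs : List κ) : (pvDD xs).Nodup := by
  induction xs with
  | nil => simp [pvDD]
  | cons x xs ih =>
    refine List.Nodup.cons ?_ (List.Nodup.filter _ ih)
    intro h
    simp at h

theorem pv_pvDD_perm_ofList {κ : Type} [DecidableEq κ] [BEq κ] [LawfulBEq κ] (xs : List κ) :
    (pvDD xs).Perm (PySem.Set.ofList xs) := by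
  rw [List.perm_ext_iff_of_nodup (pv_nodup_pvDD xs) (PySem.Set.nodup_ofList xs)]
  intro a
  rw [pv_mem_pvDD, PySem.Set.mem_ofList]

-- ---------- insertion-sort order ----------
theorem pv_pairwise_insertBy {α : Type} (before : α → α → Bool)
    (htrans : ∀ a b c, before a b = true → before b c = true → before a c = true)
    (x : α) :
    ∀ ys : List α, (hasym : ∀ a b, before a b = true → before b a = false) →
    ys.Pairwise (fun a b => before b a = false) →
    (PySem.List.insertBy before x ys).Pairwise (fun a b => before b a = false) := by
  intro ys
  induction ys with
  | nil => intro _ _; simp [PySem.List.insertBy]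
  | cons y ys ih =>
    intro hasym hp
    rw [List.pairwise_cons] at hp
    obtain ⟨hy, hys⟩ := hp
    rw [PySem.List.insertBy]
    by_cases hxy : before x y = true
    · rw [if_pos hxy]
      refine List.Pairwise.cons ?_ (List.Pairwise.cons hy hys)
      intro z hz
      rcases List.mem_cons.mp hz with rfl | hz'
      · exact hasym _ _ hxy
      · have hzy := hy z hz'
        by_cases hzx : before z x = true
        · exact absurd (htrans z x y hzx hxy) (by simp [hzy])
        · simpa using hzx
    · rw [if_neg hxy]
      refine List.Pairwise.cons ?_ (ih hasym hys)
      intro z hz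
      rcases (PySem.List.mem_insertBy _ _ _ _).mp hz with rfl | hz'
      · simpa using hxy
      · exact hy z hz'

theorem pv_pairwise_foldl_insertBy {α : Type} (before : α → α → Bool)
    (htrans : ∀ a b c, before a b = true → before b c = true → before a c = true)
    (hasym : ∀ a b, before a b = true → before b a = false) :
    ∀ (xs acc : List α), acc.Pairwise (fun a b => before b a = false) →
    (xs.foldl (fun acc x => PySem.List.insertBy before x acc) acc).Pairwise (fun a b => before b a = false) := by
  intro xs
  induction xs with
  | nil => intro acc h; simpa using h
  | cons x xs ih =>
    intro acc h
    exact ih _ (pv_pairwise_insertBy before htrans x acc hasym h)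

theorem pv_befE_trans : ∀ a b c, pvBefE a b = true → pvBefE b c = true → pvBefE a c = true := by
  intro a b c
  simp only [pvBefE, Bool.or_eq_true, Bool.and_eq_true, Bool.not_eq_true',
    decide_eq_true_eq, decide_eq_false_iff_not]
  omega

theorem pv_befE_asym : ∀ a b, pvBefE a b = true → pvBefE b a = false := by
  intro a b h
  by_contra hb
  rw [Bool.not_eq_false] at hb
  simp only [pvBefE, Bool.or_eq_true, Bool.and_eq_true, Bool.not_eq_true',
    decide_eq_true_eq, decide_eq_false_iff_not] at h hb
  omega

theorem pv_befP_trans : ∀ a b c, pvBefP a b = true → pvBefP b c = true → pvBefP a c = true := by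
  intro a b c
  simp only [pvBefP, Bool.or_eq_true, Bool.and_eq_true, Bool.not_eq_true',
    decide_eq_true_eq, decide_eq_false_iff_not]
  omega

theorem pv_befP_asym : ∀ a b, pvBefP a b = true → pvBefP b a = false := by
  intro a b h
  by_contra hb
  rw [Bool.not_eq_false] at hb
  simp only [pvBefP, Bool.or_eq_true, Bool.and_eq_true, Bool.not_eq_true',
    decide_eq_true_eq, decide_eq_false_iff_not] at h hb
  omega

theorem pv_befE_false {a b : (Int × Int) × Int} (h : pvBefE b a = false) : pvLexLe a.1 b.1 := by
  by_contra hnot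
  have hT : pvBefE b a = true := by
    simp only [pvBefE, Bool.or_eq_true, Bool.and_eq_true, Bool.not_eq_true',
      decide_eq_true_eq, decide_eq_false_iff_not]
    unfold pvLexLe at hnot
    omega
  rw [h] at hT
  exact Bool.false_ne_true hT

theorem pv_befP_false {a b : Int × Int} (h : pvBefP b a = false) : pvLexLe a b := by
  by_contra hnot
  have hT : pvBefP b a = true := by
    simp only [pvBefP, Bool.or_eq_true, Bool.and_eq_true, Bool.not_eq_true',
      decide_eq_true_eq, decide_eq_false_iff_not]
    unfold pvLexLe at hnot
    omega
  rw [h] at hT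
  exact Bool.false_ne_true hT

theorem pv_sorted2E_eq (xs : List ((Int × Int) × Int)) :
    PySem.List.sorted2 xs (fun p => p.1.1) (fun p => p.1.2) false
      = xs.foldl (fun acc x => PySem.List.insertBy pvBefE x acc) [] := rfl

theorem pv_sorted2P_eq (xs : List (Int × Int)) :
    PySem.List.sorted2 xs (fun p => p.1) (fun p => p.2) false
      = xs.foldl (fun acc x => PySem.List.insertBy pvBefP x acc) [] := rfl

theorem pv_sorted2E_pairwise (xs : List ((Int × Int) × Int)) :
    (PySem.List.sorted2 xs (fun p => p.1.1) (fun p => p.1.2) false).Pairwise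
      (fun a b => pvLexLe a.1 b.1) := by
  rw [pv_sorted2E_eq]
  exact (pv_pairwise_foldl_insertBy pvBefE pv_befE_trans pv_befE_asym xs [] (by simp)).imp
    (fun h => pv_befE_false h)

theorem pv_sorted2P_pairwise (xs : List (Int × Int)) :
    (PySem.List.sorted2 xs (fun p => p.1) (fun p => p.2) false).Pairwise pvLexLe := by
  rw [pv_sorted2P_eq]
  exact (pv_pairwise_foldl_insertBy pvBefP pv_befP_trans pv_befP_asym xs [] (by simp)).imp
    (fun h => pv_befP_false h)

theorem pv_lexLe_antisymm {a b : Int × Int} (h1 : pvLexLe a b) (h2 : pvLexLe b a) : a = b := by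
  obtain ⟨a1, a2⟩ := a; obtain ⟨b1, b2⟩ := b
  unfold pvLexLe at h1 h2
  simp_all
  omega

-- ---------- B's grouping loop ----------
theorem pv_foldl_bStep : ∀ (l : List ((Int × Int) × Int)) (k : Int × Int) (s : Int) (acc : List Int),
    bFinish (l.foldl bStep (some k, s, acc)) = acc ++ pvGrp k s l := by
  intro l
  induction l with
  | nil => intro k s acc; simp [bFinish, pvGrp]
  | cons p r ih =>
    intro k s acc
    simp only [List.foldl_cons, pvGrp, bStep]
    by_cases h : p.1 = k
    · simp only [h, ne_eq, not_true_eq_false, if_false]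
      simp [ih]
    · simp only [ne_eq, h, not_false_eq_true, if_true]
      rw [ih]
      simp [List.append_assoc]

theorem pv_grp_spec : ∀ (l : List ((Int × Int) × Int)) (k : Int × Int) (s : Int),
    (∀ p ∈ l, pvLexLe k p.1) → l.Pairwise (fun a b => pvLexLe a.1 b.1) →
    pvGrp k s l = (pvDD (k :: l.map Prod.fst)).map
      (fun c => (if c = k then s else 0) + pvSumW l c) := by
  intro l
  induction l with
  | nil => intro k s _ _; simp [pvGrp, pvDD, pvSumW]
  | cons p r ih =>
    intro k s h1 h2
    rw [List.pairwise_cons] at h2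
    obtain ⟨hp, hr⟩ := h2
    by_cases h : p.1 = k
    · rw [pvGrp, if_neg (by simpa using h)]
      rw [ih k (s + p.2) (by intro q hq; rw [← h]; exact hp q hq) hr]
      have hdd : pvDD (k :: (p :: r).map Prod.fst) = pvDD (k :: r.map Prod.fst) := by
        simp only [List.map_cons, pvDD, h]
        rw [List.filter_cons_of_neg (by simp), List.filter_filter]
        simp
      rw [hdd]
      refine List.map_congr_left ?_
      intro c hc
      rw [pv_sumW_cons]
      by_cases hck : c = k
      · subst hck
        simp [h]
        omega
      · have : (p.1 == c) = false := by
          simp [h]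
          intro h'
          exact absurd (h'.symm.trans (h ▸ rfl)) hck
        simp [hck, this]
    · rw [pvGrp, if_pos (by simpa using h)]
      have hknotin : ∀ q ∈ r, q.1 ≠ k := by
        intro q hq hqk
        have h1p : pvLexLe k p.1 := h1 p (List.mem_cons_self)
        have h2q : pvLexLe p.1 q.1 := hp q hq
        rw [hqk] at h2q
        exact h (pv_lexLe_antisymm h2q h1p)
      rw [ih p.1 p.2 hp hr]
      have hknotdd : ∀ c ∈ pvDD (p.1 :: r.map Prod.fst), c ≠ k := by
        intro c hc
        rw [pv_mem_pvDD] at hc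
        rcases List.mem_cons.mp hc with rfl | hc'
        · exact h
        · obtain ⟨q, hq, rfl⟩ := List.mem_map.mp hc'
          exact hknotin q hq
      have hdd : pvDD (k :: (p :: r).map Prod.fst)
          = k :: pvDD (p.1 :: r.map Prod.fst) := by
        simp only [List.map_cons, pvDD]
        congr 1
        exact List.filter_eq_self.mpr (fun c hc => by simpa using hknotdd c hc)
      rw [hdd]
      simp only [List.map_cons]
      congr 1
      · rw [pv_sumW_cons]
        have h1' : (p.1 == k) = false := by simpa using h
        have hz : pvSumW r k = 0 := by
          have : List.filter (fun p => p.1 == k) r = [] :=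
            List.filter_eq_nil_iff.mpr (fun q hq => by simpa using hknotin q hq)
          simp [pvSumW, this]
        simp [h1', hz]
      · refine List.map_congr_left ?_
        intro c hc
        have hck : c ≠ k := hknotdd c hc
        rw [pv_sumW_cons, if_neg hck]
        by_cases hcp : c = p.1
        · subst hcp; simp
        · have hb : (p.1 == c) = false := by
            simp
            exact fun h' => hcp h'.symm
          rw [hb]
          simp
          exact fun h' => absurd h' hcp

-- ---------- Set.ofList through an injective map ----------
theorem pv_ofList_map_inj {α κ : Type} [BEq α] [LawfulBEq α] [BEq κ] [LawfulBEq κ]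
    {f : α → κ} (hf : Function.Injective f) :
    ∀ (l acc : List α), (l.map f).foldl PySem.Set.add (acc.map f) = ((l.foldl PySem.Set.add acc).map f) := by
  intro l
  induction l with
  | nil => intro acc; simp
  | cons x xs ih =>
    intro acc
    simp only [List.map_cons, List.foldl_cons]
    rw [show PySem.Set.add (acc.map f) (f x) = (PySem.Set.add acc x).map f from ?_]
    · exact ih _
    · unfold PySem.Set.add PySem.Set.contains
      have : ((acc.map f).contains (f x)) = (acc.contains x) := by
        simp only [List.contains_eq_mem, decide_eq_decide]
        exact List.mem_map_of_injective hf
      rw [this]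
      split <;> simp

theorem pv_setOfList_map_inj {α κ : Type} [BEq α] [LawfulBEq α] [BEq κ] [LawfulBEq κ]
    {f : α → κ} (hf : Function.Injective f) (l : List α) :
    PySem.Set.ofList (l.map f) = (PySem.Set.ofList l).map f := by
  have := pv_ofList_map_inj hf l []
  simpa [PySem.Set.ofList, PySem.Set.empty] using this

theorem pv_agg_inj {κ κ' : Type} [BEq κ] [LawfulBEq κ] [BEq κ'] [LawfulBEq κ']
    {f : κ → κ'} (hf : Function.Injective f) (l : List (κ × Int)) :
    pvAgg (l.map (fun p => (f p.1, p.2))) = pvAgg l := by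
  unfold pvAgg
  have h1 : (l.map (fun p => (f p.1, p.2))).map Prod.fst = (l.map Prod.fst).map f := by
    simp [List.map_map]
  rw [h1, pv_setOfList_map_inj hf, List.map_map]
  refine List.map_congr_left ?_
  intro c _
  show pvSumW (l.map fun p => (f p.1, p.2)) (f c) = pvSumW l c
  unfold pvSumW
  rw [List.filter_map, List.map_map]
  have hcomp : ((fun p : κ' × Int => p.2) ∘ (fun p : κ × Int => (f p.1, p.2)))
      = (fun p : κ × Int => p.2) := rfl
  rw [hcomp]
  have hfc : List.filter ((fun p : κ' × Int => p.1 == f c) ∘ (fun p : κ × Int => (f p.1, p.2))) l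
      = List.filter (fun p : κ × Int => p.1 == c) l := by
    refine List.filter_congr ?_
    intro q _
    show (f q.1 == f c) = (q.1 == c)
    by_cases h : q.1 = c
    · simp [h]
    · simp [h]
      exact fun hh => h (hf hh)
  rw [hfc]

-- ---------- the add_to_counter_dict loop in insert form ----------
theorem pv_addc_eq {κ : Type} [BEq κ] [LawfulBEq κ] (d : PySem.Dict κ Int) (v : κ) (h : Int) :
    add_to_counter_dict d v h = d.insert v (d.getD v 0 + h) := by
  unfold add_to_counter_dict PySem.Dict.modify
  split_ifs with hc
  · rfl
  · rw [PySem.Dict.getD_of_not_contains d 0 (by simpa using hc), zero_add]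

theorem pv_keyA (t : Int × Int × Int) :
    PySem.Int.toStr (PySem.List.pyGetD (PySem.List.sorted [t.1, t.2.1] (fun x => x) false) 0 0) ++ ", " ++
      PySem.Int.toStr (PySem.List.pyGetD (PySem.List.sorted [t.1, t.2.1] (fun x => x) false) 1 0)
      = pvStrKey (pvKeyB t) := by
  have hs : PySem.List.sorted [t.1, t.2.1] (fun x => x) false
      = if t.2.1 < t.1 then [t.2.1, t.1] else [t.1, t.2.1] := by
    simp [PySem.List.sorted, PySem.List.insertBy]
  rw [hs]
  unfold pvKeyB pvStrKey
  by_cases h : t.1 ≤ t.2.1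
  · rw [if_neg (by omega), if_pos h]
    simp [PySem.List.pyGetD, PySem.List.pyGet?, PySem.List.pyIdx?]
  · rw [if_pos (by omega), if_neg h]
    simp [PySem.List.pyGetD, PySem.List.pyGet?, PySem.List.pyIdx?]

-- ---------- A's two-dict pipeline ----------
theorem pv_pipe {β κ : Type} [BEq κ] [LawfulBEq κ] [DecidableEq κ]
    (l : List β) (keyf : β → κ) (wf : β → Int) :
    ((l.foldl (fun d t => d.insert (keyf t) (d.getD (keyf t) 0 + wf t)) PySem.Dict.empty).items.foldl
        (fun d p => d.insert p.2 (d.getD p.2 0 + 1)) (PySem.Dict.empty : PySem.Dict Int Int)).items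
      = pvDist (pvAgg (l.map (fun t => (keyf t, wf t)))) := by
  set D1 := l.foldl (fun d t => d.insert (keyf t) (d.getD (keyf t) 0 + wf t)) PySem.Dict.empty with hD1
  have hk1 : D1.keys = PySem.Set.ofList (l.map keyf) :=
    PySem.Dict.keys_foldl_insert_key l keyf (fun d t => d.getD (keyf t) 0 + wf t) PySem.Dict.empty
  have hnd1 : D1.keys.Nodup :=
    PySem.Dict.nodup_keys_foldl_insert_key l keyf _ _ PySem.Dict.nodup_keys_empty
  have hg1 : ∀ c, D1.getD c 0 = pvSumW (l.map (fun t => (keyf t, wf t))) c := by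
    intro c
    have := pv_getD_foldl_addW keyf wf l PySem.Dict.empty c
    simpa [PySem.Dict.getD_empty] using this
  have hvals : D1.values = pvAgg (l.map (fun t => (keyf t, wf t))) := by
    rw [PySem.Dict.values_eq_map_keys D1 hnd1 0, hk1]
    unfold pvAgg
    have : ((l.map (fun t => (keyf t, wf t))).map Prod.fst) = l.map keyf := by
      simp [List.map_map]
    rw [this]
    exact List.map_congr_left (fun c _ => hg1 c)
  set D2 := D1.items.foldl (fun d p => d.insert p.2 (d.getD p.2 0 + 1)) (PySem.Dict.empty : PySem.Dict Int Int) with hD2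
  have hk2 : D2.keys = PySem.Set.ofList (D1.items.map (fun p => p.2)) :=
    PySem.Dict.keys_foldl_insert_key D1.items (fun p => p.2) (fun d p => d.getD p.2 0 + 1) PySem.Dict.empty
  have hnd2 : D2.keys.Nodup :=
    PySem.Dict.nodup_keys_foldl_insert_key D1.items (fun p => p.2) _ _ PySem.Dict.nodup_keys_empty
  have hg2 : ∀ c, D2.getD c 0 = pvSumW (D1.items.map (fun p => (p.2, (1 : Int)))) c := by
    intro c
    have := pv_getD_foldl_addW (fun p : κ × Int => p.2) (fun _ => (1 : Int)) D1.items PySem.Dict.empty c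
    simpa [PySem.Dict.getD_empty] using this
  have hitems2 : D2.items = pvDist D1.values := by
    rw [PySem.Dict.items_eq_map_keys D2 hnd2 0, hk2]
    unfold pvDist
    have hv : D1.items.map (fun p => p.2) = D1.values := rfl
    rw [hv]
    refine List.map_congr_left ?_
    intro c _
    have := hg2 c
    rw [pv_sumW_ones D1.items (fun p => p.2) c] at this
    rw [this]
    rfl
  rw [hitems2, hvals]

-- ---------- characterizations of the two ports ----------
theorem pv_A_eq (ta : List (Int × Int × Int)) :
    get_token_attack_along_edge_distribution ta
      = PySem.List.sorted2 (pvDist (pvAgg (ta.map (fun t => (pvStrKey (pvKeyB t), t.2.2)))))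
          (fun p => p.1) (fun p => p.2) false := by
  simp only [get_token_attack_along_edge_distribution, pv_addc_eq, pv_keyA]
  rw [pv_pipe ta (fun t => pvStrKey (pvKeyB t)) (fun t => t.2.2)]
  set Z := pvDist (pvAgg (ta.map (fun t => (pvStrKey (pvKeyB t), t.2.2)))) with hZ
  have hndZ : (Z.map Prod.fst).Nodup := by
    rw [hZ]
    unfold pvDist
    rw [List.map_map]
    have : (Prod.fst ∘ fun t => (t, ((pvAgg (ta.map (fun t => (pvStrKey (pvKeyB t), t.2.2)))).count t : Int))) = id := rfl
    rw [this, List.map_id]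
    exact PySem.Set.nodup_ofList _
  have hnd : ((PySem.List.sorted2 Z (fun p => p.1) (fun p => p.2) false).map Prod.fst).Nodup :=
    ((PySem.List.sorted2_perm Z (fun p => p.1) (fun p => p.2) false).map Prod.fst).nodup_iff.mpr hndZ
  exact pv_items_ofList _ hnd

theorem pv_B_eq (ta : List (Int × Int × Int)) :
    ∃ ts : List Int,
      get_token_attack_along_edge_distribution_alt ta
        = PySem.List.sorted2 (pvDist ts) (fun p => p.1) (fun p => p.2) false
      ∧ ts.Perm (pvAgg (ta.map (fun t => (pvKeyB t, t.2.2)))) := by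
  simp only [get_token_attack_along_edge_distribution_alt]
  have hkeyed : (fun (t : Int × Int × Int) => (if t.1 ≤ t.2.1 then (t.1, t.2.1) else (t.2.1, t.1), t.2.2))
      = (fun t => (pvKeyB t, t.2.2)) := rfl
  rw [hkeyed]
  set lB := ta.map (fun t => (pvKeyB t, t.2.2)) with hlB
  set sk := PySem.List.sorted2 lB (fun p => p.1.1) (fun p => p.1.2) false with hsk
  have hperm : sk.Perm lB := PySem.List.sorted2_perm lB _ _ false
  have hpw : sk.Pairwise (fun a b => pvLexLe a.1 b.1) := pv_sorted2E_pairwise lB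
  refine ⟨bFinish (sk.foldl bStep (none, 0, [])), ?_, ?_⟩
  · set ts := bFinish (sk.foldl bStep (none, 0, [])) with hts
    rw [PySem.Dict.foldl_insert_getD_add_one_eq_counter]
    have hdi : (PySem.Dict.counter ts).items = pvDist ts := by
      rw [PySem.Dict.items_counter]
      rfl
    rw [hdi]
    have hndZ : ((pvDist ts).map Prod.fst).Nodup := by
      unfold pvDist
      rw [List.map_map]
      have : (Prod.fst ∘ fun t => (t, (ts.count t : Int))) = id := rfl
      rw [this, List.map_id]
      exact PySem.Set.nodup_ofList _
    have hnd : ((PySem.List.sorted2 (pvDist ts) (fun p => p.1) (fun p => p.2) false).map Prod.fst).Nodup :=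
      ((PySem.List.sorted2_perm (pvDist ts) (fun p => p.1) (fun p => p.2) false).map Prod.fst).nodup_iff.mpr hndZ
    exact pv_items_ofList _ hnd
  · cases hsk' : sk with
    | nil =>
      have hlBnil : lB = [] := List.Perm.eq_nil (by rw [← hsk']; exact hperm.symm)
      rw [hlBnil]
      exact List.Perm.refl _
    | cons p r =>
      rw [hsk'] at hpw hperm
      rw [List.pairwise_cons] at hpw
      obtain ⟨h1, hr⟩ := hpw
      have hstep : bFinish ((p :: r).foldl bStep (none, 0, []))
          = pvGrp p.1 p.2 r := by
        rw [List.foldl_cons]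
        have : bStep (none, 0, []) p = (some p.1, p.2, []) := rfl
        rw [this, pv_foldl_bStep]
        rfl
      rw [hstep, pv_grp_spec r p.1 p.2 h1 hr]
      have hfn : ∀ c ∈ pvDD (p.1 :: r.map Prod.fst),
          (if c = p.1 then p.2 else 0) + pvSumW r c = pvSumW (p :: r) c := by
        intro c _
        have : (p : (Int × Int) × Int) = (p.1, p.2) := rfl
        rw [this, pv_sumW_cons]
        by_cases hcp : c = p.1
        · subst hcp; simp
        · have hb : (p.1 == c) = false := by
            simp
            exact fun h' => hcp h'.symm
          rw [if_neg hcp, hb]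
          simp
      rw [List.map_congr_left hfn]
      have hmf : p.1 :: r.map Prod.fst = (p :: r).map Prod.fst := rfl
      rw [hmf]
      have hperm1 : ((pvDD ((p :: r).map Prod.fst)).map (pvSumW (p :: r))).Perm
          ((PySem.Set.ofList ((p :: r).map Prod.fst)).map (pvSumW (p :: r))) :=
        (pv_pvDD_perm_ofList _).map _
      refine hperm1.trans ?_
      have hfun : pvSumW (p :: r) = pvSumW lB := funext (fun c => pv_sumW_perm hperm c)
      rw [hfun]
      unfold pvAgg
      refine List.Perm.map _ ?_
      rw [List.perm_ext_iff_of_nodup (PySem.Set.nodup_ofList _) (PySem.Set.nodup_ofList _)]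
      intro a
      rw [PySem.Set.mem_ofList, PySem.Set.mem_ofList]
      exact (hperm.map Prod.fst).mem_iff

theorem pv_dist_perm {ts ts' : List Int} (h : ts.Perm ts') : (pvDist ts).Perm (pvDist ts') := by
  unfold pvDist
  have hfun : (fun t => (t, (ts.count t : Int))) = (fun t => (t, (ts'.count t : Int))) :=
    funext (fun t => by rw [List.Perm.count_eq h])
  rw [hfun]
  refine List.Perm.map _ ?_
  rw [List.perm_ext_iff_of_nodup (PySem.Set.nodup_ofList _) (PySem.Set.nodup_ofList _)]
  intro a
  rw [PySem.Set.mem_ofList, PySem.Set.mem_ofList]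
  exact h.mem_iff

theorem pv_main (ta : List (Int × Int × Int)) :
    get_token_attack_along_edge_distribution ta = get_token_attack_along_edge_distribution_alt ta := by
  obtain ⟨ts, hB, hperm⟩ := pv_B_eq ta
  rw [pv_A_eq ta, hB]
  have hagg : pvAgg (ta.map (fun t => (pvStrKey (pvKeyB t), t.2.2)))
      = pvAgg (ta.map (fun t => (pvKeyB t, t.2.2))) := by
    have h := pv_agg_inj pv_strKey_inj (ta.map (fun t => (pvKeyB t, t.2.2)))
    rw [← h, List.map_map]
    rfl
  rw [hagg]
  refine List.eq_of_perm_of_sorted ?_ (pv_sorted2P_pairwise _) (pv_sorted2P_pairwise _) ?_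
  · intro a b _ _ hab hba
    exact pv_lexLe_antisymm hab hba
  · have p1 := PySem.List.sorted2_perm (pvDist (pvAgg (ta.map (fun t => (pvKeyB t, t.2.2)))))
      (fun p : Int × Int => p.1) (fun p : Int × Int => p.2) false
    have p2 := PySem.List.sorted2_perm (pvDist ts) (fun p : Int × Int => p.1) (fun p : Int × Int => p.2) false
    exact p1.trans ((pv_dist_perm hperm.symm).trans p2.symm)

-- ===== VERDICT (by name: the statement is the Claim_ definition above) =====
theorem get_token_attack_along_edge_distribution_spec : Claim_equal_get_token_attack_along_edge_distribution := by
  intro ta _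
  exact pv_main ta
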